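-- pv_equiv track=rewrite | github.com/iswdp/termplot | term_plot.py | make_neg_col
-- ===== SOURCE A (Python) =====
-- def make_neg_col(y,max_height):
--     #requires negative value
--     col_list = []
--     for i in reversed(range(max_height)):
--         if y >= -i:
--             col_list.append(' ')
--         else:
--             col_list.append('\u25cf')
--     return col_list
-- ===== SOURCE B (Python) =====
-- def make_neg_col(y, max_height):
--     dots = max(0, min(max_height, -y))
--     return [' '] * (max_height - dots) + ['\u25cf'] * dots
-- ===== Notes on version B (the rewrite author's own statement) =====
-- stated objective: simpler
-- what changed: Replaces the reversed-range loop with a per-cell comparison by a closed-form count of filled cells (clamp(-y,0,max_height)) and builds the column from two replicated segments.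
import Mathlib
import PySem

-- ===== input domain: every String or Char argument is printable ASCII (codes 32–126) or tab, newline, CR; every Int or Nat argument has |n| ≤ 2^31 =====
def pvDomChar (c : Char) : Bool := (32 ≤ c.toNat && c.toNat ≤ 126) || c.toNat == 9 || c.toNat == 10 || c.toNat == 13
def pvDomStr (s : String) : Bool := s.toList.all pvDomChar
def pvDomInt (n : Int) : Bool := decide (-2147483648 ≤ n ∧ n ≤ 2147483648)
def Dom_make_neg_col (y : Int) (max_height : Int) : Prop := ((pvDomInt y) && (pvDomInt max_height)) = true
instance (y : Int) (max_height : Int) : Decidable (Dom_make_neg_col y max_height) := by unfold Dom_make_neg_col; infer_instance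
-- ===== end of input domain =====

-- B computes the number of filled cells in closed form and builds the column as two replicated segments (objective: simpler).
-- ===== PORT A =====
def make_neg_col (y : Int) (max_height : Int) : List String :=
  (PySem.List.pyRange 0 max_height 1).reverse.foldl
    (fun col_list i => col_list ++ [if y ≥ -i then " " else "●"]) []

-- ===== PORT B =====
def make_neg_col_alt (y : Int) (max_height : Int) : List String :=
  let dots := max 0 (min max_height (-y))
  List.replicate (max_height - dots).toNat " " ++ List.replicate dots.toNat "●"

-- ===== PRECONDITION & SPEC =====
def Spec_make_neg_col (y : Int) (max_height : Int) (out : List String) : Prop := out = make_neg_col_alt y max_height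
instance (y : Int) (max_height : Int) (out : List String) : Decidable (Spec_make_neg_col y max_height out) := by unfold Spec_make_neg_col; infer_instance

-- ===== CLAIM (what is proved, stated in full; the proofs are below) =====
def Claim_equal_make_neg_col : Prop := ∀ (y : Int) (max_height : Int), Dom_make_neg_col y max_height → Spec_make_neg_col y max_height (make_neg_col y max_height)

-- ===== LEMMAS AND PROOFS =====
lemma foldl_app_singleton (f : Int → String) (l : List Int) (acc : List String) :
    l.foldl (fun a i => a ++ [f i]) acc = acc ++ l.map f := by
  induction l generalizing acc with
  | nil => simp
  | cons x xs ih => simp [List.foldl, ih]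

lemma make_neg_col_eq (y m : Int) :
    make_neg_col y m = ((PySem.List.pyRange 0 m 1).map (fun i => if y ≥ -i then " " else "●")).reverse := by
  unfold make_neg_col
  rw [foldl_app_singleton]
  simp

lemma key (y : Int) (n : Nat) : make_neg_col y (n : Int) = make_neg_col_alt y (n : Int) := by
  induction n with
  | zero =>
    simp [make_neg_col_eq, make_neg_col_alt, PySem.List.pyRange_one_eq_nil]
  | succ k ih =>
    have hcast : ((k + 1 : Nat) : Int) = (k : Int) + 1 := by push_cast; ring
    rw [hcast, make_neg_col_eq,
        PySem.List.pyRange_one_succ_right (by positivity : (0:Int) ≤ (k:Int))]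
    rw [make_neg_col_eq] at ih
    simp only [List.map_append, List.map_cons, List.map_nil, List.reverse_append,
      List.reverse_cons, List.reverse_nil, List.nil_append, List.singleton_append]
    rw [ih]
    by_cases h : y ≥ -(k : Int)
    · -- space appended: dot count unchanged
      have hd : max 0 (min ((k:Int)+1) (-y)) = max 0 (min (k:Int) (-y)) := by omega
      simp only [if_pos h, make_neg_col_alt, hd]
      have hs : ((k:Int) + 1 - max 0 (min (k:Int) (-y))).toNat
              = ((k:Int) - max 0 (min (k:Int) (-y))).toNat + 1 := by omega
      rw [hs, List.replicate_succ]
      simp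
    · -- dot appended: all cells so far are dots too
      have hd1 : max 0 (min ((k:Int)+1) (-y)) = (k:Int) + 1 := by omega
      have hd0 : max 0 (min (k:Int) (-y)) = (k:Int) := by omega
      simp only [if_neg h, make_neg_col_alt, hd1, hd0]
      have h1 : ((k:Int) + 1 - ((k:Int) + 1)).toNat = 0 := by omega
      have h2 : ((k:Int) - (k:Int)).toNat = 0 := by omega
      have h3 : ((k:Int) + 1).toNat = (k:Int).toNat + 1 := by omega
      rw [h1, h2, h3, List.replicate_succ]
      simp

lemma key_nonpos (y m : Int) (hm : m ≤ 0) : make_neg_col y m = make_neg_col_alt y m := by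
  rw [make_neg_col_eq, PySem.List.pyRange_one_eq_nil hm]
  have hd : (m - max 0 (min m (-y))).toNat = 0 := by omega
  have hd2 : (max 0 (min m (-y))).toNat = 0 := by omega
  simp [make_neg_col_alt, hd, hd2]

-- ===== VERDICT (by name: the statement is the Claim_ definition above) =====
theorem make_neg_col_spec : Claim_equal_make_neg_col := by
  intro y m _
  unfold Spec_make_neg_col
  rcases (by omega : m ≤ 0 ∨ 0 < m) with hm | hm
  · exact key_nonpos y m hm
  · have : m = ((m.toNat : Nat) : Int) := by omega
    rw [this]; exact key y m.toNat
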